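-- pv_equiv track=rewrite | github.com/sssswf/CyRW | cycle_SIR.py | get_cyc_neighbors_dict
-- ===== SOURCE A (Python) =====
-- from collections import defaultdict
--
-- def get_cyc_neighbors_dict(cycles_list):
--     cyc_neighbors_dict = defaultdict(list)
--     for cycle in cycles_list:
--         for i in range(len(cycle)):
--             node = cycle[i]
--             neighbors = [cycle[j] for j in range(len(cycle)) if cycle[i] != cycle[j]]
--             cyc_neighbors_dict[node].append(tuple(neighbors))  # 使用 tuple 保证元素的不可变性和有序性
--     return cyc_neighbors_dict
-- ===== SOURCE B (Python) =====
-- from collections import defaultdict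
--
-- def get_cyc_neighbors_dict(cycles_list):
--     cyc_neighbors_dict = defaultdict(list)
--     for cycle in cycles_list:
--         # scatter pass: each element x joins the neighbor buffer of every OTHER
--         # distinct value, so all neighbor lists are built simultaneously in one
--         # sweep over the cycle (the transpose of A's per-position gather).
--         distinct = list(dict.fromkeys(cycle))
--         buf = {v: [] for v in distinct}
--         for x in cycle:
--             for v in distinct:
--                 if v != x:
--                     buf[v].append(x)
--         for v in cycle:
--             cyc_neighbors_dict[v].append(tuple(buf[v]))
--     return cyc_neighbors_dict
-- ===== Notes on version B (the rewrite author's own statement) =====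
-- stated objective: alternative
-- what changed: A gathers: for every position it rescans the whole cycle to filter out equal elements; B scatters: a single sweep over the cycle appends each element to the buffer of every other distinct value, building all neighbor tuples simultaneously, then one pass over positions appends the finished tuples (inverted loop nesting, element-major distribution instead of value-major filtering).
import Mathlib
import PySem

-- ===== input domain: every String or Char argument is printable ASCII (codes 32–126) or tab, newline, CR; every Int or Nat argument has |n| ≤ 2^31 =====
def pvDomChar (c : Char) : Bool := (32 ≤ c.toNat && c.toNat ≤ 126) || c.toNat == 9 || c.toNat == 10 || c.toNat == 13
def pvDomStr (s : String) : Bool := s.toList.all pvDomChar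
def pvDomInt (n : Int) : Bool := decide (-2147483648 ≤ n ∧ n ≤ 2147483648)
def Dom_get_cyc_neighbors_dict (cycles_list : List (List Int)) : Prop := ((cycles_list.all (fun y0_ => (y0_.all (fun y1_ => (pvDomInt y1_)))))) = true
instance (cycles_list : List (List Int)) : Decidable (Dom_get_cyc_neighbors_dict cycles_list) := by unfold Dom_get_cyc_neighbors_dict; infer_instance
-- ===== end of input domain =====

-- B inverts A's loop nesting: instead of a per-position rescan (gather), one sweep over the
-- cycle scatters each element into the buffers of every other distinct value (alternative).

-- ===== PORT A =====
def get_cyc_neighbors_dict (cycles_list : List (List Int)) : List (Int × List (List Int)) :=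
  (cycles_list.foldl (fun d cycle =>
      (PySem.List.pyRange 0 (cycle.length : Int) 1).foldl (fun d i =>
        let node := PySem.List.pyGetD cycle i 0
        let neighbors := (PySem.List.pyRange 0 (cycle.length : Int) 1).foldl
          (fun acc j =>
            if node ≠ PySem.List.pyGetD cycle j 0
            then acc ++ [PySem.List.pyGetD cycle j 0] else acc) []
        d.insert node (d.getD node [] ++ [neighbors])) d)
    PySem.Dict.empty).items

-- ===== PORT B =====
def get_cyc_neighbors_dict_alt (cycles_list : List (List Int)) : List (Int × List (List Int)) :=
  (cycles_list.foldl (fun d cycle =>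
      let distinct := PySem.List.dedup cycle
      let buf0 := distinct.foldl (fun b v => b.insert v ([] : List Int)) PySem.Dict.empty
      let buf := cycle.foldl (fun b x =>
          distinct.foldl (fun b v =>
            if v ≠ x then b.insert v (b.getD v [] ++ [x]) else b) b) buf0
      cycle.foldl (fun d v => d.insert v (d.getD v [] ++ [buf.getD v []])) d)
    PySem.Dict.empty).items

-- ===== PRECONDITION & SPEC =====
def Spec_get_cyc_neighbors_dict (cycles_list : List (List Int)) (out : List (Int × List (List Int))) : Prop := out = get_cyc_neighbors_dict_alt cycles_list
instance (cycles_list : List (List Int)) (out : List (Int × List (List Int))) : Decidable (Spec_get_cyc_neighbors_dict cycles_list out) := by unfold Spec_get_cyc_neighbors_dict; infer_instance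

-- ===== CLAIM =====
def Claim_equal_get_cyc_neighbors_dict : Prop := ∀ (cycles_list : List (List Int)), Dom_get_cyc_neighbors_dict cycles_list → Spec_get_cyc_neighbors_dict cycles_list (get_cyc_neighbors_dict cycles_list)

-- ===== LEMMAS AND PROOFS =====

-- the neighbor list both programs attach to a value v of `cycle`
def pvTup (cycle : List Int) (v : Int) : List Int := cycle.filter (fun x => decide (v ≠ x))

lemma pvInner_getD_not_mem (x : Int) (l : List Int) (b : PySem.Dict Int (List Int)) (v : Int)
    (hv : v ∉ l) : (l.foldl (fun b v => if v ≠ x then b.insert v (b.getD v [] ++ [x]) else b) b).getD v [] = b.getD v [] := by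
  induction l generalizing b with
  | nil => rfl
  | cons a l ih =>
    simp only [List.foldl_cons] at *
    rw [ih _ (fun h => hv (List.mem_cons_of_mem a h))]
    split
    · rw [PySem.Dict.getD_insert]
      have : v ≠ a := fun h => hv (h ▸ List.mem_cons_self)
      simp [this]
    · rfl

lemma pvInner_getD (x : Int) (l : List Int) (b : PySem.Dict Int (List Int)) (v : Int)
    (hnd : l.Nodup) :
    (l.foldl (fun b v => if v ≠ x then b.insert v (b.getD v [] ++ [x]) else b) b).getD v [] =
      if v ∈ l ∧ v ≠ x then b.getD v [] ++ [x] else b.getD v [] := by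
  induction l generalizing b with
  | nil => simp
  | cons a l ih =>
    rcases List.nodup_cons.mp hnd with ⟨ha, hnd'⟩
    simp only [List.foldl_cons] at *
    by_cases hva : v = a
    · subst hva
      rw [pvInner_getD_not_mem x l _ v ha]
      by_cases hvx : v ≠ x
      · simp [hvx, PySem.Dict.getD_insert_self]
      · simp at hvx; simp [hvx]
    · rw [ih _ hnd']
      have : (v ∈ a :: l ∧ v ≠ x) ↔ (v ∈ l ∧ v ≠ x) := by
        constructor
        · rintro ⟨hm, hx⟩; exact ⟨(List.mem_cons.mp hm).resolve_left hva, hx⟩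
        · rintro ⟨hm, hx⟩; exact ⟨List.mem_cons_of_mem a hm, hx⟩
      rw [if_congr this rfl rfl]
      split
      · split
        · rw [PySem.Dict.getD_insert]; simp [hva]
        · rfl
      · split
        · rw [PySem.Dict.getD_insert]; simp [hva]
        · rfl

-- the scatter pass builds the filtered lists, for every key in `distinct`
lemma pvScatter_getD (distinct : List Int) (hnd : distinct.Nodup)
    (p : List Int) (b : PySem.Dict Int (List Int)) (v : Int) (hv : v ∈ distinct) :
    (p.foldl (fun b x => distinct.foldl (fun b v => if v ≠ x then b.insert v (b.getD v [] ++ [x]) else b) b) b).getD v [] =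
      b.getD v [] ++ p.filter (fun x => decide (v ≠ x)) := by
  induction p generalizing b with
  | nil => simp
  | cons x p ih =>
    simp only [List.foldl_cons]
    rw [ih _]
    rw [pvInner_getD x distinct b v hnd]
    by_cases hvx : v ≠ x
    · simp [hv, hvx]
    · simp at hvx; subst hvx; simp

-- the initial buffer dict is empty-valued everywhere
lemma pvBuf0_getD (l : List Int) (b : PySem.Dict Int (List Int)) (v : Int)
    (h : b.getD v [] = []) :
    (l.foldl (fun b v => b.insert v ([] : List Int)) b).getD v [] = [] := by
  induction l generalizing b with
  | nil => exact h
  | cons a l ih =>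
    simp only [List.foldl_cons]
    apply ih
    rw [PySem.Dict.getD_insert]
    split <;> simp [h]

lemma pvBuf_getD (cycle : List Int) (v : Int) (hv : v ∈ cycle) :
    (cycle.foldl (fun b x => (PySem.List.dedup cycle).foldl (fun b v => if v ≠ x then b.insert v (b.getD v [] ++ [x]) else b) b)
      ((PySem.List.dedup cycle).foldl (fun b v => b.insert v ([] : List Int))
        PySem.Dict.empty)).getD v [] = pvTup cycle v := by
  rw [pvScatter_getD (PySem.List.dedup cycle) (PySem.List.nodup_dedup cycle) cycle _ v
      ((PySem.List.mem_dedup cycle v).mpr hv)]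
  rw [pvBuf0_getD _ _ _ (by rw [PySem.Dict.getD_empty])]
  rfl

-- A's inner comprehension over indices computes pvTup
lemma pvA_inner (cycle : List Int) (node : Int) :
    (PySem.List.pyRange 0 (cycle.length : Int) 1).foldl
      (fun acc j =>
        if node ≠ PySem.List.pyGetD cycle j 0
        then acc ++ [PySem.List.pyGetD cycle j 0] else acc) [] = pvTup cycle node := by
  rw [PySem.List.foldl_pyRange_zero_pyGetD' cycle 0
    (fun acc x => if node ≠ x then acc ++ [x] else acc) []]
  rw [PySem.List.foldl_append_ite_eq_filter]
  simp [pvTup]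

-- per-cycle step functions of A and B agree
lemma pvPerCycle (d : PySem.Dict Int (List (List Int))) (cycle : List Int) :
    (PySem.List.pyRange 0 (cycle.length : Int) 1).foldl (fun d i =>
        let node := PySem.List.pyGetD cycle i 0
        let neighbors := (PySem.List.pyRange 0 (cycle.length : Int) 1).foldl
          (fun acc j =>
            if node ≠ PySem.List.pyGetD cycle j 0
            then acc ++ [PySem.List.pyGetD cycle j 0] else acc) []
        d.insert node (d.getD node [] ++ [neighbors])) d
    = cycle.foldl (fun d v => d.insert v (d.getD v [] ++
        [(cycle.foldl (fun b x => (PySem.List.dedup cycle).foldl (fun b v => if v ≠ x then b.insert v (b.getD v [] ++ [x]) else b) b)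
           ((PySem.List.dedup cycle).foldl (fun b v => b.insert v ([] : List Int))
             PySem.Dict.empty)).getD v []])) d := by
  rw [PySem.List.foldl_pyRange_zero_pyGetD' cycle 0
    (fun d node => d.insert node (d.getD node [] ++
      [(PySem.List.pyRange 0 (cycle.length : Int) 1).foldl
        (fun acc j =>
          if node ≠ PySem.List.pyGetD cycle j 0
          then acc ++ [PySem.List.pyGetD cycle j 0] else acc) []])) d]
  apply PySem.List.foldl_congr_mem
  intro acc x hx
  rw [pvA_inner, pvBuf_getD cycle x hx]

-- ===== VERDICT =====
theorem get_cyc_neighbors_dict_spec : Claim_equal_get_cyc_neighbors_dict := by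
  intro cycles_list _
  unfold Spec_get_cyc_neighbors_dict get_cyc_neighbors_dict get_cyc_neighbors_dict_alt
  congr 1
  apply PySem.List.foldl_congr_mem
  intro d cycle _
  exact pvPerCycle d cycle
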